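-- pv_equiv track=rewrite | github.com/konradreyhe/sacred-composer | sacred_composer/constraints.py | _clamp_all_intervals
-- ===== SOURCE A (Python) =====
-- def _step_in_scale(pitch: int, direction: int, scale_pitches: list[int]) -> int:
--     sorted_scale = sorted(set(scale_pitches))
--     if direction > 0:
--         candidates = [p for p in sorted_scale if p > pitch]
--         return candidates[0] if candidates else pitch + 2
--     else:
--         candidates = [p for p in sorted_scale if p < pitch]
--         return candidates[-1] if candidates else pitch - 2
--
-- def _clamp_all_intervals(pitches: list[int], scale_pitches: list[int], max_interval: int = 5) -> list[int]:
--     """Ensure no interval between consecutive notes exceeds max_interval semitones."""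
--     if len(pitches) <= 1:
--         return list(pitches)
--
--     result = [pitches[0]]
--     for i in range(1, len(pitches)):
--         target = pitches[i]
--         prev = result[-1]
--         interval = target - prev
--
--         if abs(interval) > max_interval:
--             # Step toward target without exceeding max_interval
--             direction = 1 if interval > 0 else -1
--             # Try scale step
--             step = _step_in_scale(prev, direction, scale_pitches)
--             if abs(step - prev) <= max_interval:
--                 target = step
--             else:
--                 target = prev + direction * 2  # force small step
--
--         result.append(max(0, min(127, target)))
--
--     return result
-- ===== SOURCE B (Python) =====
-- def _clamp_all_intervals(pitches: list[int], scale_pitches: list[int], max_interval: int = 5) -> list[int]: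
--     """Ensure no interval between consecutive notes exceeds max_interval semitones."""
--     if not pitches:
--         return []
--     # Sort and deduplicate the scale ONCE; each neighbor lookup is a binary search.
--     ss = sorted(set(scale_pitches))
--     n = len(ss)
--
--     def bisect(ok):
--         # first index at which ok fails (ok is true on a prefix of the sorted scale)
--         lo, hi = 0, n
--         while lo < hi:
--             if ok(ss[(lo + hi) // 2]):
--                 lo = (lo + hi) // 2 + 1
--             else:
--                 hi = (lo + hi) // 2
--         return lo
--
--     prev = pitches[0]
--     out = [prev]
--     for target in pitches[1:]:
--         d = target - prev
--         if abs(d) > max_interval: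
--             if d > 0:
--                 i = bisect(lambda p: p <= prev)      # successor of prev in the scale
--                 step = ss[i] if i < n else prev + 2
--             else:
--                 i = bisect(lambda p: p < prev)       # predecessor of prev in the scale
--                 step = ss[i - 1] if i > 0 else prev - 2
--             target = step if abs(step - prev) <= max_interval else prev + (2 if d > 0 else -2)
--         prev = max(0, min(127, target))
--         out.append(prev)
--     return out
-- ===== Notes on version B (the rewrite author's own statement) =====
-- stated objective: faster
-- what changed: B sorts and deduplicates the scale once up front and finds each successor/predecessor neighbor by binary search, instead of A's re-sorting the scale set and building filtered candidate lists on every clamped step.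
import Mathlib
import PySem

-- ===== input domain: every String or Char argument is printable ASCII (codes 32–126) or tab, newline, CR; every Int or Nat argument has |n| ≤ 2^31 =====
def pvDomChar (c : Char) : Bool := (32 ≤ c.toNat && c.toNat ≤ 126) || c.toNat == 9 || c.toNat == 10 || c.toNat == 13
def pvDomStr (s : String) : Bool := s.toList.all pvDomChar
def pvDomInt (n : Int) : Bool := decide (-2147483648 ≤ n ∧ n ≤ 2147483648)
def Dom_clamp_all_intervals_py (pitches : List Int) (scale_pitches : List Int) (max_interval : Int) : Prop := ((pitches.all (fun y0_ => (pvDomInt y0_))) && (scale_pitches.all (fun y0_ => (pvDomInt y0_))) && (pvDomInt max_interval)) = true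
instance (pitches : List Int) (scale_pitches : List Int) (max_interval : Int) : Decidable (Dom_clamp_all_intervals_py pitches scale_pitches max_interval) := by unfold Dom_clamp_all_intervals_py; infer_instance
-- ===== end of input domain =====

-- B sorts and deduplicates the scale once and finds each neighbor by binary search,
-- instead of A's per-step sort-and-filter of the scale (objective: faster).

-- ===== PORT A =====
-- _step_in_scale: sorts the deduplicated scale, filters, takes first/last candidate
def step_in_scale (pitch : Int) (direction : Int) (scale_pitches : List Int) : Int :=
  let sorted_scale := PySem.List.sorted (PySem.Set.ofList scale_pitches) (fun x => x) false
  if direction > 0 then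
    let candidates := sorted_scale.filter (fun p => decide (pitch < p))
    match candidates with
    | [] => pitch + 2
    | c :: _ => c
  else
    let candidates := sorted_scale.filter (fun p => decide (p < pitch))
    match candidates.getLast? with
    | some c => c
    | none => pitch - 2

-- loop over range(1, len(pitches)); i is always in range, so pyGetD's default is never used
def clamp_all_intervals_py (pitches : List Int) (scale_pitches : List Int) (max_interval : Int) : List Int :=
  if pitches.length ≤ 1 then pitches
  else
    (PySem.List.pyRange 1 (pitches.length : Int) 1).foldl (fun result i =>
      let target := PySem.List.pyGetD pitches i 0
      let prev := PySem.List.pyGetD result (-1) 0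
      let interval := target - prev
      let target :=
        if |interval| > max_interval then
          let direction : Int := if interval > 0 then 1 else -1
          let step := step_in_scale prev direction scale_pitches
          if |step - prev| ≤ max_interval then step else prev + direction * 2
        else target
      result ++ [max 0 (min 127 target)])
      [PySem.List.pyGetD pitches 0 0]

-- ===== PORT B =====
-- Source B's inner 'bisect': first index in ss at which ok fails (ok true on a prefix);
-- ss[mid] is always in range (0 ≤ mid < hi ≤ len ss), so getD's default is never used
def pvBisect (ss : List Int) (ok : Int → Bool) (lo hi : Nat) : Nat :=
  if h : lo < hi then
    if ok (ss.getD ((lo + hi) / 2) 0) then pvBisect ss ok ((lo + hi) / 2 + 1) hi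
    else pvBisect ss ok lo ((lo + hi) / 2)
  else lo
termination_by hi - lo
decreasing_by
  · have h1 : lo ≤ (lo + hi) / 2 := (Nat.le_div_iff_mul_le (by norm_num)).2 (by omega)
    omega
  · have h2 : (lo + hi) / 2 < hi := (Nat.div_lt_iff_lt_mul (by norm_num)).2 (by omega)
    omega

-- single pass carrying (prev, out); the sorted deduplicated scale is built once
def clamp_all_intervals_py_alt (pitches : List Int) (scale_pitches : List Int) (max_interval : Int) : List Int :=
  match pitches with
  | [] => []
  | p0 :: rest =>
    let ss := PySem.List.sorted (PySem.Set.ofList scale_pitches) (fun x => x) false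
    let n := ss.length
    (rest.foldl (fun (st : Int × List Int) target =>
        let prev := st.1
        let d := target - prev
        let target :=
          if |d| > max_interval then
            let step :=
              if d > 0 then
                let i := pvBisect ss (fun p => decide (p ≤ prev)) 0 n
                if i < n then ss.getD i 0 else prev + 2
              else
                let i := pvBisect ss (fun p => decide (p < prev)) 0 n
                if i > 0 then ss.getD (i - 1) 0 else prev - 2
            if |step - prev| ≤ max_interval then step else prev + (if d > 0 then 2 else -2)
          else target
        let prev' := max 0 (min 127 target)
        (prev', st.2 ++ [prev']))
      (p0, [p0])).2

-- ===== PRECONDITION & SPEC =====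
def Spec_clamp_all_intervals_py (pitches : List Int) (scale_pitches : List Int) (max_interval : Int) (out : List Int) : Prop := out = clamp_all_intervals_py_alt pitches scale_pitches max_interval
instance (pitches : List Int) (scale_pitches : List Int) (max_interval : Int) (out : List Int) : Decidable (Spec_clamp_all_intervals_py pitches scale_pitches max_interval out) := by unfold Spec_clamp_all_intervals_py; infer_instance

-- ===== CLAIM (what is proved, stated in full; the proofs are below) =====
def Claim_equal_clamp_all_intervals_py : Prop := ∀ (pitches : List Int) (scale_pitches : List Int) (max_interval : Int), Dom_clamp_all_intervals_py pitches scale_pitches max_interval → Spec_clamp_all_intervals_py pitches scale_pitches max_interval (clamp_all_intervals_py pitches scale_pitches max_interval)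

-- ===== LEMMAS AND PROOFS =====

theorem foldl_idx {β : Type} (g : β → Int → β) :
    ∀ (suf pref : List Int) (init : β),
      (PySem.List.pyRange (pref.length : Int) (((pref ++ suf).length : Nat) : Int) 1).foldl
        (fun acc i => g acc (PySem.List.pyGetD (pref ++ suf) i 0)) init
      = suf.foldl g init := by
  intro suf
  induction suf with
  | nil =>
    intro pref init
    rw [List.append_nil, PySem.List.pyRange_one_eq_nil (le_refl _)]
    rfl
  | cons a suf ih =>
    intro pref init
    have hlt : (pref.length : Int) < (((pref ++ a :: suf).length : Nat) : Int) := by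
      simp
    rw [PySem.List.pyRange_one_cons hlt, List.foldl_cons]
    have hget : PySem.List.pyGetD (pref ++ a :: suf) (pref.length : Int) 0 = a := by
      rw [PySem.List.pyGetD_natCast]
      simp
    rw [hget]
    have h2 : pref ++ a :: suf = (pref ++ [a]) ++ suf := by simp
    have h3 : ((pref.length : Int) + 1) = (((pref ++ [a]).length : Nat) : Int) := by
      simp
    rw [h2, h3, ih (pref ++ [a]) (g init a), List.foldl_cons]

theorem pyGetD_concat_neg_one (out : List Int) (v : Int) :
    PySem.List.pyGetD (out ++ [v]) (-1) 0 = v := by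
  simp

-- characterization of the binary search: if ok holds on a prefix, pvBisect finds its length
theorem pvBisect_spec (ss : List Int) (ok : Int → Bool)
    (hmono : ∀ i j : Nat, i ≤ j → j < ss.length → ok (ss.getD j 0) = true → ok (ss.getD i 0) = true) :
    ∀ m lo hi : Nat, hi - lo = m → lo ≤ hi → hi ≤ ss.length →
      (∀ k, k < lo → ok (ss.getD k 0) = true) →
      (∀ k, hi ≤ k → k < ss.length → ok (ss.getD k 0) = false) →
      (∀ k, k < pvBisect ss ok lo hi → ok (ss.getD k 0) = true) ∧
      (∀ k, pvBisect ss ok lo hi ≤ k → k < ss.length → ok (ss.getD k 0) = false) ∧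
      pvBisect ss ok lo hi ≤ ss.length := by
  intro m
  induction m using Nat.strong_induction_on with
  | _ m ih =>
    intro lo hi hm hle hhi hlow hhigh
    unfold pvBisect
    split
    · rename_i h
      have hmlo : lo ≤ (lo + hi) / 2 := (Nat.le_div_iff_mul_le (by norm_num)).2 (by omega)
      have hmhi : (lo + hi) / 2 < hi := (Nat.div_lt_iff_lt_mul (by norm_num)).2 (by omega)
      split
      · rename_i hok
        refine ih (hi - ((lo + hi) / 2 + 1)) (by omega) _ _ rfl (by omega) hhi ?_ hhigh
        intro k hk
        exact hmono k ((lo + hi) / 2) (by omega) (by omega) hok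
      · rename_i hok
        refine ih ((lo + hi) / 2 - lo) (by omega) _ _ rfl (by omega) (by omega) hlow ?_
        intro k hk hkl
        cases hh : ok (ss.getD k 0) with
        | false => rfl
        | true => exact absurd (hmono ((lo + hi) / 2) k hk hkl hh) hok
    · rename_i h
      refine ⟨hlow, ?_, by omega⟩
      intro k hk hkl
      exact hhigh k (by omega) hkl

theorem pairwise_getD {ss : List Int} (h : ss.Pairwise (· < ·)) {i j : Nat}
    (hij : i < j) (hj : j < ss.length) : ss.getD i 0 < ss.getD j 0 := by
  have hg := List.pairwise_iff_getElem.1 h i j (by omega) hj hij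
  rwa [List.getD_eq_getElem ss 0 (by omega), List.getD_eq_getElem ss 0 hj]

theorem pvFilter_eq_drop (p : Int → Bool) :
    ∀ (ss : List Int) (r : Nat), r ≤ ss.length →
      (∀ k, k < r → p (ss.getD k 0) = false) →
      (∀ k, r ≤ k → k < ss.length → p (ss.getD k 0) = true) →
      ss.filter p = ss.drop r := by
  intro ss
  induction ss with
  | nil => intro r _ _ _; simp
  | cons a t ih =>
    intro r hr hlo hhi
    cases r with
    | zero =>
      have hall : ∀ x ∈ a :: t, p x = true := by
        intro x hx
        obtain ⟨k, hk, rfl⟩ := List.mem_iff_getElem.1 hx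
        have := hhi k (Nat.zero_le _) hk
        rwa [List.getD_eq_getElem _ _ hk] at this
      simp [List.filter_eq_self.2 hall]
    | succ r' =>
      have hpa : p a = false := by
        have := hlo 0 (Nat.succ_pos _); simpa using this
      simp only [List.drop_succ_cons, List.filter_cons, hpa]
      refine ih r' (by simpa using hr) ?_ ?_
      · intro k hk; have := hlo (k + 1) (by omega); simpa using this
      · intro k hk hkl
        have := hhi (k + 1) (by omega) (by simpa using Nat.succ_lt_succ hkl)
        simpa using this

theorem pvFilter_eq_take (p : Int → Bool) :
    ∀ (ss : List Int) (r : Nat), r ≤ ss.length →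
      (∀ k, k < r → p (ss.getD k 0) = true) →
      (∀ k, r ≤ k → k < ss.length → p (ss.getD k 0) = false) →
      ss.filter p = ss.take r := by
  intro ss
  induction ss with
  | nil => intro r _ _ _; simp
  | cons a t ih =>
    intro r hr hlo hhi
    cases r with
    | zero =>
      have hnone : ∀ x ∈ a :: t, ¬ p x = true := by
        intro x hx
        obtain ⟨k, hk, rfl⟩ := List.mem_iff_getElem.1 hx
        have := hhi k (Nat.zero_le _) hk
        rw [List.getD_eq_getElem _ _ hk] at this
        simp [this]
      simp [List.filter_eq_nil_iff.2 hnone]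
    | succ r' =>
      have hpa : p a = true := by
        have := hlo 0 (Nat.succ_pos _); simpa using this
      simp only [List.take_succ_cons, List.filter_cons, hpa, if_pos]
      congr 1
      refine ih r' (by simpa using hr) ?_ ?_
      · intro k hk; have := hlo (k + 1) (by omega); simpa using this
      · intro k hk hkl
        have := hhi (k + 1) (by omega) (by simpa using Nat.succ_lt_succ hkl)
        simpa using this

-- successor of prev in the scale: A's filter-head equals B's binary search, on any strictly sorted list
theorem step_core_up (prev : Int) (ss : List Int) (hpw : ss.Pairwise (· < ·)) :
    (match ss.filter (fun p => decide (prev < p)) with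
     | [] => prev + 2
     | c :: _ => c)
    = (if pvBisect ss (fun p => decide (p ≤ prev)) 0 ss.length < ss.length then
         ss.getD (pvBisect ss (fun p => decide (p ≤ prev)) 0 ss.length) 0
       else prev + 2) := by
  have hmono : ∀ i j : Nat, i ≤ j → j < ss.length →
      (fun p => decide (p ≤ prev)) (ss.getD j 0) = true →
      (fun p => decide (p ≤ prev)) (ss.getD i 0) = true := by
    intro i j hij hj hok
    simp only [decide_eq_true_eq] at hok ⊢
    rcases Nat.lt_or_ge i j with h | h
    · exact le_of_lt (lt_of_lt_of_le (pairwise_getD hpw h hj) hok)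
    · have : i = j := by omega
      rw [this]; exact hok
  obtain ⟨h1, h2, h3⟩ := pvBisect_spec ss (fun p => decide (p ≤ prev)) hmono ss.length 0 ss.length rfl
    (Nat.zero_le _) (le_refl _) (by intro k hk; omega) (by intro k hk hkl; omega)
  set i := pvBisect ss (fun p => decide (p ≤ prev)) 0 ss.length with hidef
  have hfil : ss.filter (fun p => decide (prev < p)) = ss.drop i := by
    refine pvFilter_eq_drop _ ss i h3 ?_ ?_
    · intro k hk
      have hh := h1 k hk
      simp only [decide_eq_true_eq] at hh
      simp only [decide_eq_false_iff_not, not_lt]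
      exact hh
    · intro k hk hkl
      have hh := h2 k hk hkl
      simp only [decide_eq_false_iff_not, not_le] at hh
      simp only [decide_eq_true_eq]
      exact hh
  rw [hfil]
  rcases Nat.lt_or_ge i ss.length with hlt | hge
  · rw [List.drop_eq_getElem_cons hlt, if_pos hlt]
    rw [List.getD_eq_getElem ss 0 hlt]
  · have hieq : i = ss.length := by omega
    rw [hieq, List.drop_length, if_neg (by omega)]

-- predecessor of prev in the scale: A's filter-last equals B's binary search, on any strictly sorted list
theorem step_core_down (prev : Int) (ss : List Int) (hpw : ss.Pairwise (· < ·)) :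
    (match (ss.filter (fun p => decide (p < prev))).getLast? with
     | some c => c
     | none => prev - 2)
    = (if pvBisect ss (fun p => decide (p < prev)) 0 ss.length > 0 then
         ss.getD (pvBisect ss (fun p => decide (p < prev)) 0 ss.length - 1) 0
       else prev - 2) := by
  have hmono : ∀ i j : Nat, i ≤ j → j < ss.length →
      (fun p => decide (p < prev)) (ss.getD j 0) = true →
      (fun p => decide (p < prev)) (ss.getD i 0) = true := by
    intro i j hij hj hok
    simp only [decide_eq_true_eq] at hok ⊢
    rcases Nat.lt_or_ge i j with h | h
    · exact lt_trans (pairwise_getD hpw h hj) hok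
    · have : i = j := by omega
      rw [this]; exact hok
  obtain ⟨h1, h2, h3⟩ := pvBisect_spec ss (fun p => decide (p < prev)) hmono ss.length 0 ss.length rfl
    (Nat.zero_le _) (le_refl _) (by intro k hk; omega) (by intro k hk hkl; omega)
  set i := pvBisect ss (fun p => decide (p < prev)) 0 ss.length with hidef
  have hfil : ss.filter (fun p => decide (p < prev)) = ss.take i := by
    refine pvFilter_eq_take _ ss i h3 ?_ ?_
    · intro k hk; exact h1 k hk
    · intro k hk hkl; exact h2 k hk hkl
  rw [hfil]
  cases hi0 : i with
  | zero => simp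
  | succ i' =>
    have hipos : 0 < i := by omega
    have hlast : (ss.take i).getLast? = some (ss.getD (i - 1) 0) := by
      have hlen : (ss.take i).length = i := by simp [Nat.min_eq_left h3]
      rw [List.getLast?_eq_getElem?, hlen, List.getElem?_take_of_lt (by omega)]
      rw [List.getElem?_eq_getElem (by omega), List.getD_eq_getElem ss 0 (by omega)]
    rw [← hi0, hlast, if_pos hipos]

theorem step_up_b (prev : Int) (scale : List Int) :
    step_in_scale prev 1 scale =
      (if pvBisect (PySem.List.sorted (PySem.Set.ofList scale) (fun x => x) false) (fun p => decide (p ≤ prev)) 0 (PySem.List.sorted (PySem.Set.ofList scale) (fun x => x) false).length < (PySem.List.sorted (PySem.Set.ofList scale) (fun x => x) false).length then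
         (PySem.List.sorted (PySem.Set.ofList scale) (fun x => x) false).getD (pvBisect (PySem.List.sorted (PySem.Set.ofList scale) (fun x => x) false) (fun p => decide (p ≤ prev)) 0 (PySem.List.sorted (PySem.Set.ofList scale) (fun x => x) false).length) 0
       else prev + 2) := by
  rw [← step_core_up prev _ (PySem.List.sorted_ofList_pairwise_lt (xs := scale))]
  simp only [step_in_scale, if_pos (show (1:Int) > 0 by norm_num)]

theorem step_down_b (prev : Int) (scale : List Int) :
    step_in_scale prev (-1) scale =
      (if pvBisect (PySem.List.sorted (PySem.Set.ofList scale) (fun x => x) false) (fun p => decide (p < prev)) 0 (PySem.List.sorted (PySem.Set.ofList scale) (fun x => x) false).length > 0 then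
         (PySem.List.sorted (PySem.Set.ofList scale) (fun x => x) false).getD (pvBisect (PySem.List.sorted (PySem.Set.ofList scale) (fun x => x) false) (fun p => decide (p < prev)) 0 (PySem.List.sorted (PySem.Set.ofList scale) (fun x => x) false).length - 1) 0
       else prev - 2) := by
  rw [← step_core_down prev _ (PySem.List.sorted_ofList_pairwise_lt (xs := scale))]
  simp only [step_in_scale, if_neg (show ¬ ((-1:Int) > 0) by norm_num)]

-- the clamped value A computes for one step (prev already extracted)
def pvValA (scale_pitches : List Int) (max_interval prev target : Int) : Int :=
  let interval := target - prev
  let target :=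
    if |interval| > max_interval then
      let direction : Int := if interval > 0 then 1 else -1
      let step := step_in_scale prev direction scale_pitches
      if |step - prev| ≤ max_interval then step else prev + direction * 2
    else target
  max 0 (min 127 target)

-- the clamped value B computes for one step
def pvValB (scale_pitches : List Int) (max_interval prev target : Int) : Int :=
  let ss := PySem.List.sorted (PySem.Set.ofList scale_pitches) (fun x => x) false
  let n := ss.length
  let d := target - prev
  let target :=
    if |d| > max_interval then
      let step :=
        if d > 0 then
          let i := pvBisect ss (fun p => decide (p ≤ prev)) 0 n
          if i < n then ss.getD i 0 else prev + 2
        else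
          let i := pvBisect ss (fun p => decide (p < prev)) 0 n
          if i > 0 then ss.getD (i - 1) 0 else prev - 2
      if |step - prev| ≤ max_interval then step else prev + (if d > 0 then 2 else -2)
    else target
  max 0 (min 127 target)

theorem aval_eq (scale_pitches : List Int) (max_interval prev target : Int) :
    pvValA scale_pitches max_interval prev target = pvValB scale_pitches max_interval prev target := by
  unfold pvValA pvValB
  by_cases hbig : |target - prev| > max_interval
  · by_cases hpos : target - prev > 0
    · simp only [if_pos hbig, if_pos hpos, step_up_b]
      norm_num
    · simp only [if_pos hbig, if_neg hpos, step_down_b]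
      norm_num
  · simp only [if_neg hbig]

theorem loop_inv (scale_pitches : List Int) (max_interval : Int) :
    ∀ (suf : List Int) (out : List Int) (prev : Int),
      PySem.List.pyGetD out (-1) 0 = prev →
      suf.foldl (fun result target =>
        let prev := PySem.List.pyGetD result (-1) 0
        let interval := target - prev
        let target :=
          if |interval| > max_interval then
            let direction : Int := if interval > 0 then 1 else -1
            let step := step_in_scale prev direction scale_pitches
            if |step - prev| ≤ max_interval then step else prev + direction * 2
          else target
        result ++ [max 0 (min 127 target)]) out
      = (suf.foldl (fun (st : Int × List Int) target =>
          let prev := st.1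
          let d := target - prev
          let target :=
            if |d| > max_interval then
              let step :=
                if d > 0 then
                  let i := pvBisect (PySem.List.sorted (PySem.Set.ofList scale_pitches) (fun x => x) false) (fun p => decide (p ≤ prev)) 0 (PySem.List.sorted (PySem.Set.ofList scale_pitches) (fun x => x) false).length
                  if i < (PySem.List.sorted (PySem.Set.ofList scale_pitches) (fun x => x) false).length then (PySem.List.sorted (PySem.Set.ofList scale_pitches) (fun x => x) false).getD i 0 else prev + 2
                else
                  let i := pvBisect (PySem.List.sorted (PySem.Set.ofList scale_pitches) (fun x => x) false) (fun p => decide (p < prev)) 0 (PySem.List.sorted (PySem.Set.ofList scale_pitches) (fun x => x) false).length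
                  if i > 0 then (PySem.List.sorted (PySem.Set.ofList scale_pitches) (fun x => x) false).getD (i - 1) 0 else prev - 2
              if |step - prev| ≤ max_interval then step else prev + (if d > 0 then 2 else -2)
            else target
          let prev' := max 0 (min 127 target)
          (prev', st.2 ++ [prev'])) (prev, out)).2 := by
  intro suf
  induction suf with
  | nil => intro out prev h; rfl
  | cons t suf ih =>
    intro out prev h
    set f : List Int → Int → List Int := (fun result target =>
        let prev := PySem.List.pyGetD result (-1) 0
        let interval := target - prev
        let target :=
          if |interval| > max_interval then
            let direction : Int := if interval > 0 then 1 else -1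
            let step := step_in_scale prev direction scale_pitches
            if |step - prev| ≤ max_interval then step else prev + direction * 2
          else target
        result ++ [max 0 (min 127 target)]) with hf
    set gB : Int × List Int → Int → Int × List Int := (fun (st : Int × List Int) target =>
          let prev := st.1
          let d := target - prev
          let target :=
            if |d| > max_interval then
              let step :=
                if d > 0 then
                  let i := pvBisect (PySem.List.sorted (PySem.Set.ofList scale_pitches) (fun x => x) false) (fun p => decide (p ≤ prev)) 0 (PySem.List.sorted (PySem.Set.ofList scale_pitches) (fun x => x) false).length
                  if i < (PySem.List.sorted (PySem.Set.ofList scale_pitches) (fun x => x) false).length then (PySem.List.sorted (PySem.Set.ofList scale_pitches) (fun x => x) false).getD i 0 else prev + 2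
                else
                  let i := pvBisect (PySem.List.sorted (PySem.Set.ofList scale_pitches) (fun x => x) false) (fun p => decide (p < prev)) 0 (PySem.List.sorted (PySem.Set.ofList scale_pitches) (fun x => x) false).length
                  if i > 0 then (PySem.List.sorted (PySem.Set.ofList scale_pitches) (fun x => x) false).getD (i - 1) 0 else prev - 2
              if |step - prev| ≤ max_interval then step else prev + (if d > 0 then 2 else -2)
            else target
          let prev' := max 0 (min 127 target)
          (prev', st.2 ++ [prev'])) with hg
    have e2 : f out t = out ++ [pvValA scale_pitches max_interval (PySem.List.pyGetD out (-1) 0) t] := rfl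
    have e4 : gB (prev, out) t
        = (pvValB scale_pitches max_interval prev t, out ++ [pvValB scale_pitches max_interval prev t]) := rfl
    rw [List.foldl_cons, List.foldl_cons, e2, e4, h, aval_eq]
    exact ih _ _ (pyGetD_concat_neg_one _ _)

-- ===== VERDICT (by name: the statement is the Claim_ definition above) =====
theorem clamp_all_intervals_py_spec : Claim_equal_clamp_all_intervals_py := by
  intro pitches scale_pitches max_interval _
  unfold Spec_clamp_all_intervals_py clamp_all_intervals_py clamp_all_intervals_py_alt
  match pitches with
  | [] => rfl
  | [x] => rfl
  | x :: y :: rest =>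
    rw [if_neg (by simp)]
    have h1 : (PySem.List.pyRange 1 (((x :: y :: rest).length : Nat) : Int) 1).foldl
        (fun result i =>
          let target := PySem.List.pyGetD (x :: y :: rest) i 0
          let prev := PySem.List.pyGetD result (-1) 0
          let interval := target - prev
          let target :=
            if |interval| > max_interval then
              let direction : Int := if interval > 0 then 1 else -1
              let step := step_in_scale prev direction scale_pitches
              if |step - prev| ≤ max_interval then step else prev + direction * 2
            else target
          result ++ [max 0 (min 127 target)])
        [PySem.List.pyGetD (x :: y :: rest) 0 0]
      = (y :: rest).foldl
        (fun result target =>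
          let prev := PySem.List.pyGetD result (-1) 0
          let interval := target - prev
          let target :=
            if |interval| > max_interval then
              let direction : Int := if interval > 0 then 1 else -1
              let step := step_in_scale prev direction scale_pitches
              if |step - prev| ≤ max_interval then step else prev + direction * 2
            else target
          result ++ [max 0 (min 127 target)])
        [PySem.List.pyGetD (x :: y :: rest) 0 0] :=
      foldl_idx (g := fun result target =>
          let prev := PySem.List.pyGetD result (-1) 0
          let interval := target - prev
          let target :=
            if |interval| > max_interval then
              let direction : Int := if interval > 0 then 1 else -1
              let step := step_in_scale prev direction scale_pitches
              if |step - prev| ≤ max_interval then step else prev + direction * 2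
            else target
          result ++ [max 0 (min 127 target)]) (y :: rest) [x] _
    rw [h1]
    have h0 : PySem.List.pyGetD (x :: y :: rest) 0 0 = x := by simp [pysem]
    rw [h0]
    exact loop_inv scale_pitches max_interval (y :: rest) [x] x (pyGetD_concat_neg_one [] x)
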